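-- pv_equiv track=rewrite | github.com/RissRossApplesauce/DKC3 | Long Solutions/HeighwayDragon/HeighwayDragon.py | solve
-- ===== SOURCE A (Python) =====
-- import traceback, functools, itertools, cmath, math, collections, re, operator
--
-- d0 = list('Fa')
--
-- sub1 = list('aRbFR')
--
-- sub2 = list('LFaLb')
--
-- def replace(c):
--     if c == ['a']:
--         return sub1
--     if c == ['b']:
--         return sub2
--     return c
--
-- def solve(x):
--     n, snum = x
--     s = list(map(lambda a: list(a), d0))
--     e = list()
--     for i in range(0, n):
--         s = list(map(replace, s))
--         s = list(map(lambda a: list(a), list(itertools.chain.from_iterable(s))))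
--
--     loc = [0, 0]
--     dir = [0, 1]
--     steps = 0
--     r1 = list()
--     s = ''.join(list(map(lambda a: str(a), s)))
--     for c in s:
--         if c == 'F':
--             loc[0] += dir[0]
--             loc[1] += dir[1]
--             steps += 1
--         if c == 'L':
--             dircpy = dir.copy()
--             dir[0] = -dircpy[1]
--             dir[1] = dircpy[0]
--         if c == 'R':
--             dircpy = dir.copy()
--             dir[0] = dircpy[1]
--             dir[1] = -dircpy[0]
--         if steps == snum:
--             r1 = loc.copy()
--
--     return n, snum, r1, loc, steps
-- ===== SOURCE B (Python) =====
-- # Closed-form walk of the Heighway dragon: per-level (displacement, rotation) effects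
-- # and a logarithmic descent for the snum-prefix position -- no string expansion.
--
-- def _cmul(a, b):
--     return (a[0]*b[0] - a[1]*b[1], a[0]*b[1] + a[1]*b[0])
--
-- def _cadd(a, b):
--     return (a[0]+b[0], a[1]+b[1])
--
-- def solve(x):
--     n, snum = x
--     m = n if n > 0 else 0
--     I = (0, 1)    # rotate left  (complex i)
--     NI = (0, -1)  # rotate right (complex -i)
--     # effect (v, r) of the level-l expansions of 'a' and 'b' (start dir = 1+0j):
--     # A_{l+1} = A_l R B_l F R ; B_{l+1} = L F A_l L B_l
--     levels = []
--     va, ra, vb, rb = (0, 0), (1, 0), (0, 0), (1, 0)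
--     for _ in range(m):
--         levels.append((va, ra, vb, rb))
--         rani = _cmul(ra, NI)
--         va2 = _cadd(va, _cmul(rani, _cadd(vb, rb)))
--         ra2 = _cmul(_cmul(rani, rb), NI)
--         vb2 = _cadd(I, _cadd(_cmul(I, va), _cmul(_cmul(_cmul(I, ra), I), vb)))
--         rb2 = _cmul(_cmul(_cmul(I, ra), I), rb)
--         va, ra, vb, rb = va2, ra2, vb2, rb2
--     total = 2 ** m                                   # number of F's in F·A_m
--     end = _cadd(I, _cmul(I, va))                     # endpoint, start at 0 facing i
--     if snum < 0 or snum > total: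
--         r1 = []
--     elif snum == 0:
--         r1 = [0, 0]
--     else:
--         # descend to the position right after the snum-th F
--         pos, dir, k = I, I, snum - 1                 # first char is an F
--         sym, level = 'a', m
--         while level > 0 and k > 0:
--             va, ra, vb, rb = levels[level - 1]
--             cnt = 2 ** (level - 1) - 1
--             level -= 1
--             if sym == 'a':                           # A_l R B_l F R
--                 if k <= cnt:
--                     continue
--                 pos = _cadd(pos, _cmul(dir, va))
--                 dir = _cmul(_cmul(dir, ra), NI)
--                 k -= cnt
--                 if k <= cnt:
--                     sym = 'b'
--                     continue
--                 pos = _cadd(pos, _cmul(dir, vb))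
--                 pos = _cadd(pos, _cmul(dir, rb))     # the trailing F (k == cnt+1 here)
--                 k = 0
--             else:                                    # L F A_l L B_l
--                 dir = _cmul(dir, I)
--                 pos = _cadd(pos, dir)
--                 k -= 1
--                 if k <= cnt:
--                     sym = 'a'
--                 else:
--                     pos = _cadd(pos, _cmul(dir, va))
--                     dir = _cmul(_cmul(dir, ra), I)
--                     k -= cnt
--                     sym = 'b'
--         r1 = [pos[0], pos[1]]
--     return n, snum, r1, [end[0], end[1]], total
-- ===== Notes on version B (the rewrite author's own statement) =====
-- stated objective: faster
-- what changed: A expands the L-system string to length ~2^n and walks every character; B never builds the string: it computes per-level (displacement, rotation) effects of the 'a'/'b' expansions by a linear recurrence, gets the step count as 2^n, the endpoint by one complex multiplication, and the snum-prefix position by a single descent through the levels.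
import Mathlib
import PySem

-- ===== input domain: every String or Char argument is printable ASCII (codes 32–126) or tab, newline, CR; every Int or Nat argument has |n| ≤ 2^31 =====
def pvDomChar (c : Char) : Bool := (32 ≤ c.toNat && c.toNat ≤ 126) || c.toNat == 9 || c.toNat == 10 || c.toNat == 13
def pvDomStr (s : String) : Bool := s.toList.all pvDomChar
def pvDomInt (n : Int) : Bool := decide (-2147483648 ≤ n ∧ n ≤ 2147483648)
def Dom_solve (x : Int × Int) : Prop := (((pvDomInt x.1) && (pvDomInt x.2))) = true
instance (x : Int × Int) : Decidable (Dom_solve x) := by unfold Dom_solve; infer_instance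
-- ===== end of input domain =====

-- B replaces A's exponential L-system string expansion by O(n) per-level
-- (displacement, rotation) effects plus an O(n)-depth descent for the snum prefix.


-- ===== PORT A =====
def sub1L : List Char := ['a', 'R', 'b', 'F', 'R']

def sub2L : List Char := ['L', 'F', 'a', 'L', 'b']

def replaceL (c : List Char) : List Char :=
  if c = ['a'] then sub1L else if c = ['b'] then sub2L else c

-- one iteration of the expansion loop body
def expandStep (s : List (List Char)) : List (List Char) :=
  ((s.map replaceL).flatten).map (fun c => [c])

-- str(lst) for a list of single characters, e.g. str(['F']) = "['F']"
def pyStrList (c : List Char) : List Char :=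
  '[' :: (List.intercalate [',', ' '] (c.map (fun ch => ['\'', ch, '\'']))) ++ [']']

-- the body of A's walk loop: state = (loc, dir, steps, r1)
def stepA (snum : Int) (st : (Int × Int) × (Int × Int) × Int × List Int) (c : Char) :
    (Int × Int) × (Int × Int) × Int × List Int :=
  let loc := st.1
  let dir := st.2.1
  let steps := st.2.2.1
  let r1 := st.2.2.2
  let loc := if c = 'F' then (loc.1 + dir.1, loc.2 + dir.2) else loc
  let steps := if c = 'F' then steps + 1 else steps
  let dir := if c = 'L' then (-dir.2, dir.1) else if c = 'R' then (dir.2, -dir.1) else dir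
  let r1 := if steps = snum then [loc.1, loc.2] else r1
  (loc, dir, steps, r1)

def solve (x : Int × Int) : Int × Int × List Int × List Int × Int :=
  let n := x.1
  let snum := x.2
  let s : List (List Char) :=
    (PySem.List.pyRange 0 n 1).foldl (fun s _ => expandStep s) [['F'], ['a']]
  let w : List Char := (s.map pyStrList).flatten
  let fin := w.foldl (stepA snum) ((0, 0), (0, 1), 0, ([] : List Int))
  (n, snum, fin.2.2.2, [fin.1.1, fin.1.2], fin.2.2.1)

-- ===== PORT B =====
def cmul (a b : Int × Int) : Int × Int := (a.1 * b.1 - a.2 * b.2, a.1 * b.2 + a.2 * b.1)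

def cadd (a b : Int × Int) : Int × Int := (a.1 + b.1, a.2 + b.2)

-- (va, ra, vb, rb): displacement and rotation of the level-l expansions of 'a' and 'b'
def effs : Nat → (Int × Int) × (Int × Int) × (Int × Int) × (Int × Int)
  | 0 => ((0, 0), (1, 0), (0, 0), (1, 0))
  | l + 1 =>
    let e := effs l
    let va := e.1; let ra := e.2.1; let vb := e.2.2.1; let rb := e.2.2.2
    let rani := cmul ra (0, -1)
    (cadd va (cmul rani (cadd vb rb)),
     cmul (cmul rani rb) (0, -1),
     cadd (0, 1) (cadd (cmul (0, 1) va) (cmul (cmul (cmul (0, 1) ra) (0, 1)) vb)),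
     cmul (cmul (cmul (0, 1) ra) (0, 1)) rb)

-- position right after k more F's inside the level-l expansion of 'a' (sym = true) / 'b'
def descend : Nat → Bool → Int → (Int × Int) → (Int × Int) → Int × Int
  | 0, _, _, pos, _ => pos
  | l + 1, sym, k, pos, dir =>
    if k ≤ 0 then pos else
    let e := effs l
    let va := e.1; let ra := e.2.1; let vb := e.2.2.1; let rb := e.2.2.2
    let cnt : Int := 2 ^ l - 1
    if sym then  -- A_{l+1} = A_l R B_l F R
      if k ≤ cnt then descend l true k pos dir
      else
        let pos := cadd pos (cmul dir va)
        let dir := cmul (cmul dir ra) (0, -1)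
        let k := k - cnt
        if k ≤ cnt then descend l false k pos dir
        else cadd (cadd pos (cmul dir vb)) (cmul dir rb)  -- the trailing F (k = cnt + 1)
    else  -- B_{l+1} = L F A_l L B_l
      let dir := cmul dir (0, 1)
      let pos := cadd pos dir
      let k := k - 1
      if k ≤ cnt then descend l true k pos dir
      else descend l false (k - cnt) (cadd pos (cmul dir va)) (cmul (cmul dir ra) (0, 1))

def solve_alt (x : Int × Int) : Int × Int × List Int × List Int × Int :=
  let n := x.1
  let snum := x.2
  let m : Nat := n.toNat
  let e := effs m
  let total : Int := 2 ^ m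
  let endp := cadd (0, 1) (cmul (0, 1) e.1)
  let r1 : List Int :=
    if snum < 0 ∨ total < snum then []
    else if snum = 0 then [0, 0]
    else
      let pos := descend m true (snum - 1) (0, 1) (0, 1)
      [pos.1, pos.2]
  (n, snum, r1, [endp.1, endp.2], total)

-- ===== PRECONDITION & SPEC =====
def Spec_solve (x : Int × Int) (out : Int × Int × List Int × List Int × Int) : Prop := out = solve_alt x
instance (x : Int × Int) (out : Int × Int × List Int × List Int × Int) : Decidable (Spec_solve x out) := by unfold Spec_solve; infer_instance

-- ===== CLAIM (what is proved, stated in full; the proofs are below) =====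
def Claim_equal_solve : Prop := ∀ (x : Int × Int), Dom_solve x → Spec_solve x (solve x)

-- ===== LEMMAS AND PROOFS =====

-- symbolic model: substitution and the level-l expansions of 'a' and 'b'
def subC (c : Char) : List Char := if c = 'a' then sub1L else if c = 'b' then sub2L else [c]

def substW (w : List Char) : List Char := w.flatMap subC

def expP : Nat → List Char × List Char
  | 0 => (['a'], ['b'])
  | l + 1 =>
    let p := expP l
    (p.1 ++ 'R' :: p.2 ++ ['F', 'R'], 'L' :: 'F' :: p.1 ++ 'L' :: p.2)

-- number of 'F's
def fcnt : List Char → Int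
  | [] => 0
  | c :: w => (if c = 'F' then 1 else 0) + fcnt w

-- (displacement, rotation) of a walk string, starting direction 1
def vrot : List Char → (Int × Int) × (Int × Int)
  | [] => ((0, 0), (1, 0))
  | c :: w =>
    let p := vrot w
    if c = 'F' then (cadd (1, 0) p.1, p.2)
    else if c = 'L' then (cmul (0, 1) p.1, cmul (0, 1) p.2)
    else if c = 'R' then (cmul (0, -1) p.1, cmul (0, -1) p.2)
    else p

-- position right after the k-th 'F' (0 for k ≤ 0), starting direction 1
def prefv : List Char → Int → Int × Int
  | [], _ => (0, 0)
  | c :: w, k =>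
    if k ≤ 0 then (0, 0)
    else if c = 'F' then cadd (1, 0) (prefv w (k - 1))
    else if c = 'L' then cmul (0, 1) (prefv w k)
    else if c = 'R' then cmul (0, -1) (prefv w k)
    else prefv w k

-- the trailing r1-check of A's loop body, as a function of the state
def chk (snum : Int) (st : (Int × Int) × (Int × Int) × Int × List Int) :
    (Int × Int) × (Int × Int) × Int × List Int :=
  (st.1, st.2.1, st.2.2.1, if st.2.2.1 = snum then [st.1.1, st.1.2] else st.2.2.2)

lemma foldl_const_iter {α : Type} (f : α → α) (l : List Int) (a : α) :
    l.foldl (fun s _ => f s) a = f^[l.length] a := by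
  induction l generalizing a with
  | nil => rfl
  | cons x l ih => simp [List.foldl_cons, ih, Function.iterate_succ_apply]

lemma expandStep_sing (w : List Char) :
    expandStep (w.map (fun c => [c])) = (substW w).map (fun c => [c]) := by
  have h : (replaceL ∘ fun c : Char => [c]) = subC := by
    funext c
    simp only [Function.comp, replaceL, subC]
    by_cases h1 : c = 'a' <;> by_cases h2 : c = 'b' <;> simp [h1, h2]
  unfold expandStep substW
  rw [List.map_map, h, ← List.flatMap_def]

lemma substW_expP (l : Nat) :
    substW (expP l).1 = (expP (l + 1)).1 ∧ substW (expP l).2 = (expP (l + 1)).2 := by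
  induction l with
  | zero => constructor <;> rfl
  | succ l ih =>
    obtain ⟨h1, h2⟩ := ih
    constructor
    · show substW ((expP l).1 ++ 'R' :: (expP l).2 ++ ['F', 'R']) = _
      simp only [substW, List.flatMap_append, List.flatMap_cons] at *
      simp [h1, h2, subC, expP]
    · show substW ('L' :: 'F' :: (expP l).1 ++ 'L' :: (expP l).2) = _
      simp only [substW, List.flatMap_append, List.flatMap_cons] at *
      simp [h1, h2, subC, expP]

lemma iter_subst (k : Nat) : substW^[k] ['F', 'a'] = 'F' :: (expP k).1 := by
  induction k with
  | zero => rfl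
  | succ k ih =>
    rw [Function.iterate_succ_apply', ih]
    have : substW ('F' :: (expP k).1) = 'F' :: substW (expP k).1 := by
      simp [substW, subC]
    rw [this, (substW_expP k).1]

lemma pyStrList_sing (c : Char) : pyStrList [c] = ['[', '\'', c, '\'', ']'] := by
  simp [pyStrList, List.intercalate]

lemma chk_chk (snum : Int) (st : (Int × Int) × (Int × Int) × Int × List Int) :
    chk snum (chk snum st) = chk snum st := by
  simp only [chk]
  split_ifs <;> simp_all

lemma chk_stepA (snum : Int) (st : (Int × Int) × (Int × Int) × Int × List Int) (c : Char) :
    chk snum (stepA snum st c) = stepA snum st c := by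
  simp only [stepA, chk]
  split_ifs <;> simp_all

lemma stepA_other (snum : Int) (st : (Int × Int) × (Int × Int) × Int × List Int) (c : Char)
    (hF : c ≠ 'F') (hL : c ≠ 'L') (hR : c ≠ 'R') : stepA snum st c = chk snum st := by
  simp [stepA, chk, hF, hL, hR]

lemma group_fold (snum : Int) (st : (Int × Int) × (Int × Int) × Int × List Int) (c : Char) :
    List.foldl (stepA snum) st ['[', '\'', c, '\'', ']'] = stepA snum (chk snum st) c := by
  simp only [List.foldl_cons, List.foldl_nil]
  rw [stepA_other snum st '[' (by decide) (by decide) (by decide),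
    stepA_other snum (chk snum st) '\'' (by decide) (by decide) (by decide), chk_chk,
    stepA_other snum (stepA snum (chk snum st) c) '\'' (by decide) (by decide) (by decide),
    chk_stepA,
    stepA_other snum (stepA snum (chk snum st) c) ']' (by decide) (by decide) (by decide),
    chk_stepA]

lemma flat_fold (snum : Int) (w : List Char)
    (st : (Int × Int) × (Int × Int) × Int × List Int) (hst : chk snum st = st) :
    List.foldl (stepA snum) st (w.flatMap (fun c => ['[', '\'', c, '\'', ']'])) =
      List.foldl (stepA snum) st w := by
  induction w generalizing st with
  | nil => rfl
  | cons c w ih =>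
    rw [List.flatMap_cons, List.foldl_append, group_fold, hst, List.foldl_cons]
    exact ih _ (chk_stepA _ _ _)

-- per-character unfolding of the model functions
lemma fcnt_cons_F (w : List Char) : fcnt ('F' :: w) = 1 + fcnt w := by simp [fcnt]

lemma fcnt_cons_other (c : Char) (w : List Char) (hF : c ≠ 'F') :
    fcnt (c :: w) = fcnt w := by simp [fcnt, hF]

lemma vrot_cons_F (w : List Char) :
    vrot ('F' :: w) = (cadd (1, 0) (vrot w).1, (vrot w).2) := by simp [vrot]

lemma vrot_cons_L (w : List Char) :
    vrot ('L' :: w) = (cmul (0, 1) (vrot w).1, cmul (0, 1) (vrot w).2) := by simp [vrot]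

lemma vrot_cons_R (w : List Char) :
    vrot ('R' :: w) = (cmul (0, -1) (vrot w).1, cmul (0, -1) (vrot w).2) := by simp [vrot]

lemma vrot_cons_other (c : Char) (w : List Char) (hF : c ≠ 'F') (hL : c ≠ 'L') (hR : c ≠ 'R') :
    vrot (c :: w) = vrot w := by simp [vrot, hF, hL, hR]

lemma prefv_cons_F (w : List Char) (k : Int) (hk : 0 < k) :
    prefv ('F' :: w) k = cadd (1, 0) (prefv w (k - 1)) := by
  simp [prefv]; omega

lemma prefv_cons_L (w : List Char) (k : Int) (hk : 0 < k) :
    prefv ('L' :: w) k = cmul (0, 1) (prefv w k) := by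
  simp [prefv]; intro h; omega

lemma prefv_cons_R (w : List Char) (k : Int) (hk : 0 < k) :
    prefv ('R' :: w) k = cmul (0, -1) (prefv w k) := by
  simp [prefv]; intro h; omega

lemma prefv_cons_other (c : Char) (w : List Char) (k : Int) (hk : 0 < k)
    (hF : c ≠ 'F') (hL : c ≠ 'L') (hR : c ≠ 'R') : prefv (c :: w) k = prefv w k := by
  simp [prefv, hF, hL, hR]; intro h; omega

lemma fcnt_nonneg (w : List Char) : 0 ≤ fcnt w := by
  induction w with
  | nil => simp [fcnt]
  | cons c w ih => simp only [fcnt]; split_ifs <;> omega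

lemma fcnt_append (x y : List Char) : fcnt (x ++ y) = fcnt x + fcnt y := by
  induction x with
  | nil => simp [fcnt]
  | cons c x ih => simp only [List.cons_append, fcnt, ih]; ring

lemma cmul_assoc (a b c : Int × Int) : cmul (cmul a b) c = cmul a (cmul b c) := by
  simp [cmul, Prod.ext_iff]; constructor <;> ring

lemma cmul_one (a : Int × Int) : cmul (1, 0) a = a := by
  simp [cmul]

lemma cadd_zero (a : Int × Int) : cadd a (0, 0) = a := by
  simp [cadd]

lemma zero_cadd (a : Int × Int) : cadd (0, 0) a = a := by
  simp [cadd]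

lemma cmul_zero (a : Int × Int) : cmul a (0, 0) = (0, 0) := by
  simp [cmul]

lemma cmul_cadd (a b c : Int × Int) : cmul a (cadd b c) = cadd (cmul a b) (cmul a c) := by
  simp [cmul, cadd, Prod.ext_iff]; constructor <;> ring

lemma cadd_assoc (a b c : Int × Int) : cadd (cadd a b) c = cadd a (cadd b c) := by
  simp [cadd, Prod.ext_iff]; constructor <;> ring

lemma vrot_append (x y : List Char) :
    vrot (x ++ y) =
      (cadd (vrot x).1 (cmul (vrot x).2 (vrot y).1), cmul (vrot x).2 (vrot y).2) := by
  induction x with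
  | nil => simp [vrot, cmul_one, zero_cadd]
  | cons c x ih =>
    by_cases hF : c = 'F'
    · subst hF
      simp only [List.cons_append, vrot_cons_F, ih, cadd_assoc]
    · by_cases hL : c = 'L'
      · subst hL
        simp only [List.cons_append, vrot_cons_L, ih, cmul_cadd, cmul_assoc]
      · by_cases hR : c = 'R'
        · subst hR
          simp only [List.cons_append, vrot_cons_R, ih, cmul_cadd, cmul_assoc]
        · simp only [List.cons_append, vrot_cons_other c _ hF hL hR, ih]

lemma prefv_nonpos (w : List Char) (k : Int) (hk : k ≤ 0) : prefv w k = (0, 0) := by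
  cases w <;> simp [prefv, hk]

lemma prefv_append_le (x y : List Char) (k : Int) (hk : k ≤ fcnt x) :
    prefv (x ++ y) k = prefv x k := by
  induction x generalizing k with
  | nil =>
    simp only [fcnt] at hk
    rw [List.nil_append, prefv_nonpos y k hk]
    rfl
  | cons c x ih =>
    by_cases hk0 : k ≤ 0
    · rw [prefv_nonpos _ _ hk0, prefv_nonpos _ _ hk0]
    · have hk0' : 0 < k := by omega
      by_cases hF : c = 'F'
      · subst hF
        rw [List.cons_append, prefv_cons_F _ _ hk0', prefv_cons_F _ _ hk0',
          ih _ (by rw [fcnt_cons_F] at hk; omega)]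
      · by_cases hL : c = 'L'
        · subst hL
          rw [List.cons_append, prefv_cons_L _ _ hk0', prefv_cons_L _ _ hk0',
            ih _ (by rw [fcnt_cons_other _ _ (by decide)] at hk; omega)]
        · by_cases hR : c = 'R'
          · subst hR
            rw [List.cons_append, prefv_cons_R _ _ hk0', prefv_cons_R _ _ hk0',
              ih _ (by rw [fcnt_cons_other _ _ (by decide)] at hk; omega)]
          · rw [List.cons_append, prefv_cons_other c _ _ hk0' hF hL hR,
              prefv_cons_other c _ _ hk0' hF hL hR,
              ih _ (by rw [fcnt_cons_other _ _ hF] at hk; omega)]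

lemma prefv_append_gt (x y : List Char) (k : Int) (hk : fcnt x < k) :
    prefv (x ++ y) k = cadd (vrot x).1 (cmul (vrot x).2 (prefv y (k - fcnt x))) := by
  induction x generalizing k with
  | nil =>
    show prefv y k = _
    simp only [fcnt, vrot]
    rw [cmul_one, zero_cadd]
    norm_num
  | cons c x ih =>
    have hk0 : 0 < k := by
      have h1 := fcnt_nonneg (c :: x)
      omega
    by_cases hF : c = 'F'
    · subst hF
      rw [fcnt_cons_F] at hk ⊢
      rw [List.cons_append, prefv_cons_F _ _ hk0, ih _ (by omega), vrot_cons_F]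
      have he : k - 1 - fcnt x = k - (1 + fcnt x) := by ring
      simp only [he, cadd_assoc]
    · by_cases hL : c = 'L'
      · subst hL
        rw [fcnt_cons_other _ _ (by decide)] at hk ⊢
        rw [List.cons_append, prefv_cons_L _ _ hk0, ih _ hk, vrot_cons_L]
        simp only [cmul_cadd, cmul_assoc]
      · by_cases hR : c = 'R'
        · subst hR
          rw [fcnt_cons_other _ _ (by decide)] at hk ⊢
          rw [List.cons_append, prefv_cons_R _ _ hk0, ih _ hk, vrot_cons_R]
          simp only [cmul_cadd, cmul_assoc]
        · rw [fcnt_cons_other _ _ hF] at hk ⊢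
          rw [List.cons_append, prefv_cons_other c _ _ hk0 hF hL hR, ih _ hk,
            vrot_cons_other c _ hF hL hR]

lemma fcnt_expP (l : Nat) : fcnt (expP l).1 = 2 ^ l - 1 ∧ fcnt (expP l).2 = 2 ^ l - 1 := by
  induction l with
  | zero => constructor <;> rfl
  | succ l ih =>
    obtain ⟨h1, h2⟩ := ih
    have hp : (2 : Int) ^ (l + 1) = 2 ^ l * 2 := pow_succ 2 l
    constructor
    · show fcnt ((expP l).1 ++ 'R' :: (expP l).2 ++ ['F', 'R']) = _
      simp [fcnt, fcnt_append, h1, h2, hp]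
      ring
    · show fcnt ('L' :: 'F' :: (expP l).1 ++ 'L' :: (expP l).2) = _
      simp [fcnt, List.cons_append, fcnt_append, h1, h2, hp]
      ring

lemma cmul_one' (a : Int × Int) : cmul a (1, 0) = a := by
  simp [cmul]

lemma effs_eq (l : Nat) :
    effs l = ((vrot (expP l).1).1, (vrot (expP l).1).2, (vrot (expP l).2).1, (vrot (expP l).2).2) := by
  induction l with
  | zero => decide
  | succ l ih =>
    have hFR : vrot ['F', 'R'] = ((1, 0), (0, -1)) := by decide
    have e1 : (expP (l + 1)).1 = (expP l).1 ++ 'R' :: ((expP l).2 ++ ['F', 'R']) := by simp [expP]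
    have e2 : (expP (l + 1)).2 = 'L' :: 'F' :: ((expP l).1 ++ 'L' :: (expP l).2) := by simp [expP]
    simp only [effs, ih, e1, e2, vrot_append, vrot_cons_R, vrot_cons_L, vrot_cons_F, hFR]
    simp only [cmul, cadd, Prod.ext_iff]
    norm_num
    and_intros <;> ring

lemma descend_eq (l : Nat) (sym : Bool) (k : Int) (pos dir : Int × Int)
    (hk : k ≤ 2 ^ l - 1) :
    descend l sym k pos dir =
      cadd pos (cmul dir (prefv (if sym then (expP l).1 else (expP l).2) k)) := by
  induction l generalizing sym k pos dir with
  | zero =>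
    have hk0 : k ≤ 0 := by norm_num at hk; exact hk
    rw [prefv_nonpos _ _ hk0, cmul_zero, cadd_zero]
    rfl
  | succ l ih =>
    have hA : fcnt (expP l).1 = 2 ^ l - 1 := (fcnt_expP l).1
    have hB : fcnt (expP l).2 = 2 ^ l - 1 := (fcnt_expP l).2
    have hpow : (2 : Int) ^ (l + 1) = 2 ^ l * 2 := pow_succ 2 l
    have hpos : (0 : Int) < 2 ^ l := by positivity
    have ihA : ∀ (k : Int) (pos dir : Int × Int), k ≤ 2 ^ l - 1 →
        descend l true k pos dir = cadd pos (cmul dir (prefv (expP l).1 k)) := by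
      intro k pos dir h
      rw [ih true k pos dir h]
      simp only [reduceIte]
    have ihB : ∀ (k : Int) (pos dir : Int × Int), k ≤ 2 ^ l - 1 →
        descend l false k pos dir = cadd pos (cmul dir (prefv (expP l).2 k)) := by
      intro k pos dir h
      rw [ih false k pos dir h]
      simp only [Bool.false_eq_true, reduceIte]
    by_cases hk0 : k ≤ 0
    · rw [prefv_nonpos _ _ hk0, cmul_zero, cadd_zero]
      cases sym <;> simp [descend, hk0]
    · have hk0' : 0 < k := by omega
      rw [descend]
      simp only [if_neg hk0, effs_eq l]
      cases sym
      · -- 'b' : L F A_l L B_l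
        have e2 : (expP (l + 1)).2 = 'L' :: 'F' :: ((expP l).1 ++ 'L' :: (expP l).2) := by
          simp [expP]
        simp only [Bool.false_eq_true, reduceIte, e2]
        rw [prefv_cons_L _ _ hk0', prefv_cons_F _ _ hk0']
        by_cases h1 : k - 1 ≤ 2 ^ l - 1
        · rw [if_pos h1, ihA _ _ _ h1, prefv_append_le _ _ _ (by omega)]
          simp only [cmul, cadd, Prod.ext_iff]
          and_intros <;> ring
        · rw [if_neg h1, ihB _ _ _ (by omega),
            prefv_append_gt _ _ _ (by omega), hA,
            prefv_cons_L _ _ (by omega)]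
          simp only [cmul, cadd, Prod.ext_iff]
          and_intros <;> ring
      · -- 'a' : A_l R B_l F R
        have e1 : (expP (l + 1)).1 = (expP l).1 ++ 'R' :: ((expP l).2 ++ ['F', 'R']) := by
          simp [expP]
        simp only [reduceIte, e1]
        by_cases h1 : k ≤ 2 ^ l - 1
        · rw [if_pos h1, ihA _ _ _ h1, prefv_append_le _ _ _ (by omega)]
        · rw [if_neg h1, prefv_append_gt _ _ _ (by omega), hA,
            prefv_cons_R _ _ (by omega)]
          by_cases h2 : k - (2 ^ l - 1) ≤ 2 ^ l - 1
          · rw [if_pos h2, ihB _ _ _ h2, prefv_append_le _ _ _ (by omega)]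
            simp only [cmul, cadd, Prod.ext_iff]
            and_intros <;> ring
          · have hFR1 : prefv ['F', 'R'] (k - (2 ^ l - 1) - (2 ^ l - 1)) = (1, 0) := by
              rw [show k - (2 ^ l - 1) - (2 ^ l - 1) = 1 by omega]
              decide
            rw [if_neg h2, prefv_append_gt _ _ _ (by omega), hB, hFR1]
            simp only [cmul, cadd, Prod.ext_iff]
            and_intros <;> ring

lemma stepA_F (snum : Int) (p d : Int × Int) (t : Int) (r : List Int) :
    stepA snum (p, d, t, r) 'F' =
      ((p.1 + d.1, p.2 + d.2), d, t + 1,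
        if t + 1 = snum then [p.1 + d.1, p.2 + d.2] else r) := by
  simp [stepA]

lemma stepA_L (snum : Int) (p d : Int × Int) (t : Int) (r : List Int) :
    stepA snum (p, d, t, r) 'L' =
      (p, (-d.2, d.1), t, if t = snum then [p.1, p.2] else r) := by
  simp [stepA]

lemma stepA_R (snum : Int) (p d : Int × Int) (t : Int) (r : List Int) :
    stepA snum (p, d, t, r) 'R' =
      (p, (d.2, -d.1), t, if t = snum then [p.1, p.2] else r) := by
  simp [stepA]

lemma walk_char (snum : Int) (w : List Char) : ∀ (p d : Int × Int) (t : Int) (r : List Int),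
    (t = snum → r = [p.1, p.2]) →
    w.foldl (stepA snum) (p, d, t, r) =
      (cadd p (cmul d (vrot w).1), cmul d (vrot w).2, t + fcnt w,
       if t ≤ snum ∧ snum ≤ t + fcnt w then
         [(cadd p (cmul d (prefv w (snum - t)))).1, (cadd p (cmul d (prefv w (snum - t)))).2]
       else r) := by
  induction w with
  | nil =>
    intro p d t r hr
    simp only [List.foldl_nil, vrot, fcnt, cmul_zero, cadd_zero, cmul_one', add_zero]
    by_cases h : t = snum
    · rw [if_pos (by omega), prefv_nonpos _ _ (by omega), cmul_zero, cadd_zero, hr h]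
    · rw [if_neg (by omega)]
  | cons c w ih =>
    intro p d t r hr
    have hrfix : (if t = snum then [p.1, p.2] else r) = r := by
      split_ifs with h
      · exact (hr h).symm
      · rfl
    have hfn := fcnt_nonneg w
    by_cases hF : c = 'F'
    · subst hF
      rw [List.foldl_cons, stepA_F,
        ih (p.1 + d.1, p.2 + d.2) d (t + 1) _ (fun h => by rw [if_pos h]),
        vrot_cons_F, fcnt_cons_F]
      refine Prod.ext ?_ (Prod.ext ?_ (Prod.ext ?_ ?_)) <;> dsimp only
      · simp only [cadd, cmul, Prod.ext_iff]
        constructor <;> ring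
      · omega
      · by_cases h1 : snum < t
        · rw [if_neg (by omega), if_neg (by omega), if_neg (by omega)]
        · by_cases h2 : snum = t
          · rw [if_neg (by omega), if_neg (by omega), if_pos (by omega),
              prefv_nonpos _ _ (by omega), cmul_zero, cadd_zero, hr h2.symm]
          · by_cases h3 : snum ≤ t + 1 + fcnt w
            · rw [if_pos (by omega), if_pos (by omega),
                prefv_cons_F _ _ (by omega), show snum - (t + 1) = snum - t - 1 by ring]
              simp only [cadd, cmul]
              norm_num
              constructor <;> ring
            · rw [if_neg (by omega), if_neg (by omega), if_neg (by omega)]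
    · by_cases hL : c = 'L'
      · subst hL
        rw [List.foldl_cons, stepA_L, hrfix, ih p (-d.2, d.1) t r hr,
          vrot_cons_L, fcnt_cons_other _ _ (by decide)]
        refine Prod.ext ?_ (Prod.ext ?_ (Prod.ext ?_ ?_)) <;> dsimp only
        · simp only [cadd, cmul, Prod.ext_iff]; constructor <;> ring
        · simp only [cmul, Prod.ext_iff]; constructor <;> ring
        · by_cases h1 : t ≤ snum ∧ snum ≤ t + fcnt w
          · rw [if_pos h1, if_pos h1]
            by_cases h2 : snum = t
            · rw [prefv_nonpos _ _ (by omega), prefv_nonpos _ _ (by omega),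
                cmul_zero, cmul_zero]
            · rw [prefv_cons_L _ _ (by omega)]
              simp only [cmul, cadd]
              norm_num
              and_intros <;> ring
          · rw [if_neg h1, if_neg h1]
      · by_cases hR : c = 'R'
        · subst hR
          rw [List.foldl_cons, stepA_R, hrfix, ih p (d.2, -d.1) t r hr,
            vrot_cons_R, fcnt_cons_other _ _ (by decide)]
          refine Prod.ext ?_ (Prod.ext ?_ (Prod.ext ?_ ?_)) <;> dsimp only
          · simp only [cadd, cmul, Prod.ext_iff]; constructor <;> ring
          · simp only [cmul, Prod.ext_iff]; constructor <;> ring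
          · by_cases h1 : t ≤ snum ∧ snum ≤ t + fcnt w
            · rw [if_pos h1, if_pos h1]
              by_cases h2 : snum = t
              · rw [prefv_nonpos _ _ (by omega), prefv_nonpos _ _ (by omega),
                  cmul_zero, cmul_zero]
              · rw [prefv_cons_R _ _ (by omega)]
                simp only [cmul, cadd]
                norm_num
                and_intros <;> ring
            · rw [if_neg h1, if_neg h1]
        · rw [List.foldl_cons, stepA_other snum _ c hF hL hR]
          have hc : chk snum (p, d, t, r) = (p, d, t, r) := by
            simp only [chk, hrfix]
          rw [hc, ih p d t r hr, vrot_cons_other c _ hF hL hR,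
            fcnt_cons_other _ _ hF]
          refine Prod.ext rfl (Prod.ext rfl (Prod.ext rfl ?_))
          dsimp only
          by_cases h1 : t ≤ snum ∧ snum ≤ t + fcnt w
          · rw [if_pos h1, if_pos h1]
            by_cases h2 : snum = t
            · rw [prefv_nonpos _ _ (by omega), prefv_nonpos _ _ (by omega)]
            · rw [prefv_cons_other c _ _ (by omega) hF hL hR]
          · rw [if_neg h1, if_neg h1]

lemma iter_expand (k : Nat) :
    expandStep^[k] [['F'], ['a']] = ('F' :: (expP k).1).map (fun c => [c]) := by
  have h : ∀ j : Nat, expandStep^[j] [['F'], ['a']] = (substW^[j] ['F', 'a']).map (fun c => [c]) := by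
    intro j
    induction j with
    | zero => rfl
    | succ j ihj =>
      rw [Function.iterate_succ_apply', ihj, expandStep_sing,
        show substW^[j + 1] ['F', 'a'] = substW (substW^[j] ['F', 'a']) from
          Function.iterate_succ_apply' _ _ _]
  rw [h, iter_subst]

-- ===== VERDICT (by name: the statement is the Claim_ definition above) =====
theorem solve_spec : Claim_equal_solve := by
  unfold Claim_equal_solve
  intro x _
  unfold Spec_solve
  obtain ⟨n, snum⟩ := x
  simp only [solve, solve_alt]
  set m : Nat := n.toNat with hm
  have hs : (PySem.List.pyRange 0 n 1).foldl (fun s _ => expandStep s) [['F'], ['a']] =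
      ('F' :: (expP m).1).map (fun c => [c]) := by
    rw [foldl_const_iter, PySem.List.length_pyRange_one,
      show n - 0 = n by ring, ← hm, iter_expand]
  rw [hs]
  have hw : ((('F' :: (expP m).1).map (fun c => [c])).map pyStrList).flatten =
      ('F' :: (expP m).1).flatMap (fun c => ['[', '\'', c, '\'', ']']) := by
    rw [List.map_map, List.flatMap_def]
    have hfn : (pyStrList ∘ fun c : Char => [c]) = fun c => ['[', '\'', c, '\'', ']'] :=
      funext fun c => pyStrList_sing c
    rw [hfn]
  rw [hw]
  have hflat : List.foldl (stepA snum) ((0, 0), (0, 1), 0, ([] : List Int))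
      (('F' :: (expP m).1).flatMap (fun c => ['[', '\'', c, '\'', ']'])) =
      List.foldl (stepA snum) (chk snum ((0, 0), (0, 1), 0, ([] : List Int)))
        ('F' :: (expP m).1) := by
    rw [List.flatMap_cons, List.foldl_append, group_fold, List.foldl_cons]
    exact flat_fold snum _ _ (chk_stepA _ _ _)
  rw [hflat]
  have hchk : chk snum ((0, 0), (0, 1), 0, ([] : List Int)) =
      (((0 : Int), (0 : Int)), ((0 : Int), (1 : Int)), (0 : Int),
        (if (0 : Int) = snum then [(0 : Int), 0] else [])) := by
    simp [chk]
  rw [hchk, walk_char snum _ _ _ _ _ (fun h => by rw [if_pos h])]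
  have hA : fcnt (expP m).1 = 2 ^ m - 1 := (fcnt_expP m).1
  have hfw : fcnt ('F' :: (expP m).1) = 2 ^ m := by
    rw [fcnt_cons_F, hA]; ring
  have hpos : (0 : Int) < 2 ^ m := by positivity
  have hvr := effs_eq m
  refine Prod.ext rfl (Prod.ext rfl (Prod.ext ?_ (Prod.ext ?_ ?_))) <;> dsimp only
  · -- r1
    by_cases h1 : snum < 0 ∨ (2 : Int) ^ m < snum
    · rw [if_neg (by rw [hfw]; omega), if_pos h1, if_neg (by omega)]
    · rw [not_or, not_lt, not_lt] at h1
      rw [if_pos (by rw [hfw]; omega), if_neg (by omega)]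
      by_cases h2 : snum = 0
      · subst h2
        rw [if_pos rfl, prefv_nonpos _ _ (by omega), cmul_zero, cadd_zero]
      · rw [if_neg h2,
          descend_eq m true (snum - 1) (0, 1) (0, 1) (by omega)]
        simp only [reduceIte]
        rw [prefv_cons_F _ _ (by omega),
          show snum - 0 - 1 = snum - 1 by ring]
        simp only [cadd, cmul]
        norm_num
  · -- loc
    rw [vrot_cons_F, hvr]
    simp only [cadd, cmul]
    norm_num
  · -- steps
    rw [hfw]; ring
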